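-- pv_equiv track=rewrite | github.com/eringiman12/TimeCard_OCR_Soft | asset/python/Name_Concat.py | Concat_ary_create
-- ===== SOURCE A (Python) =====
-- def Concat_ary_create(data):
--    # 名前検索配列に代入
--    Shozoku_serch_ary = data
--    # 名前
--    Cover_Staff_ary = []
--    Not_Cover_Staff_ary = []
--
--    # 被り配列の作成
--    for item in data:
--       # 被りカウント
--       cnt = 0
--       # 名前変数
--       Name = item[0]
--       # 名前リスト
--       Name_list = []
--       # 所属名配列ループ
--       for item2 in Shozoku_serch_ary:
--          # 名前被りの検索
--          if item2[0] == Name: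
--             # 名前格納
--             Name_list.append(item2[0])
--             # シート名格納
--             Name_list.append(item2[1])
--             cnt += 1
--
--       # 名前被りが存在する場合にtrue
--       if cnt != 1:
--          # 存在するかどうか
--          sonzai = True
--          for item in Cover_Staff_ary:
--              if item[0] == Name:
--                 sonzai = False
--          # 名前被り配列に追加
--          if sonzai:
--             Cover_Staff_ary.append(Name_list)
--       else:
--          # 名前被り以外
--          Not_Cover_Staff_ary.append(Name_list)
--
--    return Cover_Staff_ary, Not_Cover_Staff_ary
-- ===== SOURCE B (Python) =====
-- def Concat_ary_create(data):
--     # One pass: group sheet names by staff name, then emit groups in first-seen order.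
--     groups = {}
--     for row in data:
--         groups.setdefault(row[0], []).append(row[1])
--     cover, not_cover = [], []
--     for name, sheets in groups.items():
--         flat = []
--         for s in sheets:
--             flat += [name, s]
--         if len(sheets) == 1:
--             not_cover.append(flat)
--         else:
--             cover.append(flat)
--     return cover, not_cover
-- ===== Notes on version B (the rewrite author's own statement) =====
-- stated objective: faster
-- what changed: Replaced A's per-row rescan of the whole table (plus a rescan of the cover list for dedup) by a single dict pass grouping sheet names per staff name, then one pass over the groups in first-seen order.
import Mathlib
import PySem

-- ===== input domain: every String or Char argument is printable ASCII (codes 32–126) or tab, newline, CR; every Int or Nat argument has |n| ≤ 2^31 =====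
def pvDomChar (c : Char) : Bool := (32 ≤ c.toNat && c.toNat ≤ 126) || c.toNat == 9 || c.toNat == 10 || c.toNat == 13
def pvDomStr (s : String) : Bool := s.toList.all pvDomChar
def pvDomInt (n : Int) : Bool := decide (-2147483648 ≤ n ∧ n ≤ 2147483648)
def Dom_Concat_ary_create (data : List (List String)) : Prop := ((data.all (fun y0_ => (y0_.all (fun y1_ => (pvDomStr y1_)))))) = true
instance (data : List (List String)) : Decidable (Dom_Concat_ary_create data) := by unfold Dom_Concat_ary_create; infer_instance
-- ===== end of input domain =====

-- B replaces A's quadratic rescan per row by one dict pass grouping sheets per name,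
-- emitting groups in first-seen order (objective: faster, O(n^2) → O(n·k)).

-- row[0] / row[1] (Python raises IndexError on short rows; Pre_ excludes those inputs)
def pvFst (r : List String) : String := (PySem.List.pyGet? r 0).getD ""
def pvSnd (r : List String) : String := (PySem.List.pyGet? r 1).getD ""

-- ===== PORT A =====
def Concat_ary_create (data : List (List String)) : List (List String) × List (List String) :=
  data.foldl (fun (acc : List (List String) × List (List String)) item =>
    let Name := pvFst item
    let inner := data.foldl (fun (p : List String × Int) item2 =>
        if pvFst item2 == Name then (p.1 ++ [pvFst item2, pvSnd item2], p.2 + 1) else p)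
      ([], 0)
    if inner.2 ≠ 1 then
      let sonzai := acc.1.foldl (fun s it => if pvFst it == Name then false else s) true
      if sonzai then (acc.1 ++ [inner.1], acc.2) else acc
    else (acc.1, acc.2 ++ [inner.1])) ([], [])

-- ===== PORT B =====
def Concat_ary_create_alt (data : List (List String)) : List (List String) × List (List String) :=
  let groups : PySem.Dict String (List String) :=
    data.foldl (fun g row => g.modify (pvFst row) [] (fun v => v ++ [pvSnd row])) PySem.Dict.empty
  groups.items.foldl (fun (acc : List (List String) × List (List String)) kv =>
    let flat := kv.2.foldl (fun f s => f ++ [kv.1, s]) []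
    if kv.2.length == 1 then (acc.1, acc.2 ++ [flat]) else (acc.1 ++ [flat], acc.2)) ([], [])

-- ===== PRECONDITION & SPEC =====
-- Pre_: every row has at least two entries; on shorter rows Python A (and B) raise IndexError.
def Pre_Concat_ary_create (data : List (List String)) : Prop :=
  ∀ r ∈ data, 2 ≤ r.length
instance (data : List (List String)) : Decidable (Pre_Concat_ary_create data) := by
  unfold Pre_Concat_ary_create; infer_instance
def pvWitness_Concat_ary_create : List (List String) :=
  [["a", "x"], ["a", "y"], ["b", "z"]]

def Spec_Concat_ary_create (data : List (List String)) (out : List (List String) × List (List String)) : Prop := out = Concat_ary_create_alt data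
instance (data : List (List String)) (out : List (List String) × List (List String)) : Decidable (Spec_Concat_ary_create data out) := by unfold Spec_Concat_ary_create; infer_instance

-- ===== CLAIM (what is proved, stated in full; the proofs are below) =====
def Claim_equal_Concat_ary_create : Prop := ∀ (data : List (List String)), Dom_Concat_ary_create data → Pre_Concat_ary_create data → Spec_Concat_ary_create data (Concat_ary_create data)

-- ===== LEMMAS AND PROOFS =====

-- heads, per-name sheet list, and the Name_list both programs build for a name
def pvHeads (d : List (List String)) : List String := d.map pvFst
def pvShts (d : List (List String)) (n : String) : List String :=
  ((d.map (fun r => (pvFst r, pvSnd r))).filter (fun p => p.1 == n)).map (fun p => p.2)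
def pvGrp (d : List (List String)) (n : String) : List String :=
  (pvShts d n).flatMap (fun s => [n, s])
def pvC (d p : List (List String)) : List (List String) :=
  ((PySem.Set.ofList (pvHeads p)).filter (fun n => !((pvHeads d).count n == 1))).map (pvGrp d)
def pvN (d p : List (List String)) : List (List String) :=
  (p.filter (fun r => (pvHeads d).count (pvFst r) == 1)).map (fun r => pvGrp d (pvFst r))

lemma pvShts_cons (r : List String) (d : List (List String)) (n : String) :
    pvShts (r :: d) n = if pvFst r == n then pvSnd r :: pvShts d n else pvShts d n := by
  simp only [pvShts, List.map_cons, List.filter_cons]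
  split <;> simp

lemma innerA (d : List (List String)) (n : String) (acc : List String × Int) :
    d.foldl (fun (p : List String × Int) item2 =>
        if pvFst item2 == n then (p.1 ++ [pvFst item2, pvSnd item2], p.2 + 1) else p) acc
      = (acc.1 ++ pvGrp d n, acc.2 + ((pvHeads d).count n : Int)) := by
  induction d generalizing acc with
  | nil => simp [pvGrp, pvShts, pvHeads]
  | cons r d ih =>
    simp only [List.foldl_cons]
    by_cases h : pvFst r == n
    · have hn : pvFst r = n := by exact eq_of_beq h
      rw [if_pos h, ih]
      simp [pvGrp, pvShts_cons, hn, pvHeads]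
      omega
    · rw [if_neg h, ih]
      have hn : ¬ pvFst r = n := fun he => h (by simp [he])
      simp [pvGrp, pvShts_cons, h, pvHeads, hn]

lemma pvGrp_head (d : List (List String)) (n : String) (h : n ∈ pvHeads d) :
    pvFst (pvGrp d n) = n := by
  have hne : pvShts d n ≠ [] := by
    simp only [pvHeads, List.mem_map] at h
    obtain ⟨r, hr, hrn⟩ := h
    simp only [pvShts, ne_eq, List.map_eq_nil_iff, List.filter_eq_nil_iff, not_forall]
    exact ⟨(pvFst r, pvSnd r), List.mem_map.mpr ⟨r, hr, rfl⟩, by simp [hrn]⟩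
  obtain ⟨s, rest, hs⟩ := List.exists_cons_of_ne_nil hne
  simp [pvGrp, hs, pvFst, PySem.List.pyGet?_zero_cons]

lemma any_beq_mem (l : List String) (a : String) :
    (l.any fun x => x == a) = decide (a ∈ l) := by
  induction l with
  | nil => simp
  | cons b t ih =>
    by_cases hb : b = a
    · simp [hb]
    · simp [List.any_cons, ih, hb, Ne.symm hb]

lemma filter_add (s : List String) (x : String) (P : String → Bool) :
    (PySem.Set.add s x).filter P
      = s.filter P ++ (if x ∈ s then [] else if P x then [x] else []) := by
  rw [PySem.Set.add_eq_ite]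
  split
  · simp
  · rw [List.filter_append]
    cases hP : P x <;> simp [hP]

lemma A_prefix (d : List (List String)) :
    ∀ (p : List (List String)), (∀ r ∈ p, pvFst r ∈ pvHeads d) →
    p.foldl (fun (acc : List (List String) × List (List String)) item =>
      let Name := pvFst item
      let inner := d.foldl (fun (p : List String × Int) item2 =>
          if pvFst item2 == Name then (p.1 ++ [pvFst item2, pvSnd item2], p.2 + 1) else p)
        ([], 0)
      if inner.2 ≠ 1 then
        let sonzai := acc.1.foldl (fun s it => if pvFst it == Name then false else s) true
        if sonzai then (acc.1 ++ [inner.1], acc.2) else acc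
      else (acc.1, acc.2 ++ [inner.1])) ([], [])
      = (pvC d p, pvN d p) := by
  intro p
  induction p using List.reverseRecOn with
  | nil => intro _; simp [pvC, pvN, pvHeads]
  | append_singleton q r ih =>
    intro hsub
    have hq : ∀ r' ∈ q, pvFst r' ∈ pvHeads d := fun r' hr' => hsub r' (by simp [hr'])
    have hr : pvFst r ∈ pvHeads d := hsub r (by simp)
    rw [List.foldl_append, ih hq]
    simp only [List.foldl_cons, List.foldl_nil]
    show (if (d.foldl (fun (p : List String × Int) item2 =>
            if pvFst item2 == pvFst r then (p.1 ++ [pvFst item2, pvSnd item2], p.2 + 1) else p)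
          ([], 0)).2 ≠ 1 then
        if (pvC d q).foldl (fun s it => if pvFst it == pvFst r then false else s) true then
          (pvC d q ++ [(d.foldl (fun (p : List String × Int) item2 =>
            if pvFst item2 == pvFst r then (p.1 ++ [pvFst item2, pvSnd item2], p.2 + 1) else p)
          ([], 0)).1], pvN d q)
        else (pvC d q, pvN d q)
      else (pvC d q, pvN d q ++ [(d.foldl (fun (p : List String × Int) item2 =>
            if pvFst item2 == pvFst r then (p.1 ++ [pvFst item2, pvSnd item2], p.2 + 1) else p)
          ([], 0)).1]))
      = (pvC d (q ++ [r]), pvN d (q ++ [r]))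
    rw [innerA d (pvFst r) ([], 0)]
    simp only [List.nil_append, zero_add]
    rw [PySem.List.foldl_if_false_eq (fun it => pvFst it == pvFst r) (pvC d q) true,
      Bool.true_and]
    have hheads : pvHeads (q ++ [r]) = pvHeads q ++ [pvFst r] := by simp [pvHeads]
    have hany : ((pvC d q).any fun it => pvFst it == pvFst r)
        = decide (pvFst r ∈ (PySem.Set.ofList (pvHeads q)).filter
            (fun n => !((pvHeads d).count n == 1))) := by
      unfold pvC
      rw [List.any_map]
      rw [PySem.List.any_congr_mem (g := fun x => x == pvFst r) (fun x hx => by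
        have hx1 : x ∈ pvHeads q := (PySem.Set.mem_ofList _ _).mp (List.mem_of_mem_filter hx)
        have hx2 : x ∈ pvHeads d := by
          obtain ⟨r', hr', he⟩ := List.mem_map.mp hx1
          exact he ▸ hq r' hr'
        show (pvFst (pvGrp d x) == pvFst r) = (x == pvFst r)
        rw [pvGrp_head d x hx2])]
      rw [any_beq_mem]
    by_cases hc : (pvHeads d).count (pvFst r) = 1
    · have hc' : ((pvHeads d).count (pvFst r) : Int) = 1 := by exact_mod_cast hc
      rw [if_neg (by simp [hc'])]
      have h1 : pvC d (q ++ [r]) = pvC d q := by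
        unfold pvC
        rw [hheads, PySem.Set.ofList_append_singleton, filter_add]
        simp [hc]
      have h2 : pvN d (q ++ [r]) = pvN d q ++ [pvGrp d (pvFst r)] := by
        unfold pvN
        rw [List.filter_append]
        simp [hc]
      rw [h1, h2]
    · have hc' : ((pvHeads d).count (pvFst r) : Int) ≠ 1 := by exact_mod_cast hc
      rw [if_pos hc', hany]
      have h2 : pvN d (q ++ [r]) = pvN d q := by
        unfold pvN
        rw [List.filter_append]
        simp [hc]
      by_cases hm : pvFst r ∈ PySem.Set.ofList (pvHeads q)
      · have hmf : pvFst r ∈ (PySem.Set.ofList (pvHeads q)).filter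
            (fun n => !((pvHeads d).count n == 1)) :=
          List.mem_filter.mpr ⟨hm, by simp [hc]⟩
        rw [decide_eq_true hmf]
        have h1 : pvC d (q ++ [r]) = pvC d q := by
          unfold pvC
          rw [hheads, PySem.Set.ofList_append_singleton, PySem.Set.add_of_mem hm]
        simp [h1, h2]
      · rw [decide_eq_false (fun h => hm (List.mem_of_mem_filter h))]
        have h1 : pvC d (q ++ [r]) = pvC d q ++ [pvGrp d (pvFst r)] := by
          unfold pvC
          rw [hheads, PySem.Set.ofList_append_singleton, filter_add, if_neg hm]
          simp [hc]
        simp [h1, h2]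

lemma L_filter_once (l : List String) (P : String → Bool)
    (h : ∀ n, P n = true → l.count n ≤ 1) :
    l.filter P = (PySem.Set.ofList l).filter P := by
  induction l with
  | nil => rfl
  | cons a t ih =>
    rw [PySem.Set.ofList_cons, List.filter_cons, List.filter_cons]
    by_cases hPa : P a = true
    · have hat : a ∉ t := by
        have := h a hPa
        simp [List.count_cons] at this
        exact List.count_eq_zero.mp (by omega)
      rw [if_pos hPa, if_pos hPa]
      have ht : ∀ n, P n = true → t.count n ≤ 1 := by
        intro n hn
        have := h n hn
        simp [List.count_cons] at this
        omega
      rw [ih ht]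
      congr 1
      simp only [PySem.Set.discard]
      rw [List.filter_filter, List.filter_congr]
      intro x hx
      have hxt : x ∈ t := (PySem.Set.mem_ofList _ _).mp hx
      have hxa : x ≠ a := fun he => hat (he ▸ hxt)
      simp [hxa]
    · have hPa' : P a = false := by simpa using hPa
      rw [if_neg hPa, if_neg hPa]
      have ht : ∀ n, P n = true → t.count n ≤ 1 := by
        intro n hn
        have := h n hn
        simp [List.count_cons] at this
        omega
      rw [ih ht]
      simp only [PySem.Set.discard]
      rw [List.filter_filter, List.filter_congr]
      intro x hx
      by_cases hxa : x = a
      · subst hxa; simp [hPa']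
      · simp [hxa]

lemma shts_length (d : List (List String)) (n : String) :
    (pvShts d n).length = (pvHeads d).count n := by
  induction d with
  | nil => rfl
  | cons r t ih =>
    rw [pvShts_cons]
    by_cases h : (pvFst r == n) = true
    · simp [h, pvHeads, List.count_cons, eq_of_beq h] at ih ⊢
      omega
    · simp [h, pvHeads, List.count_cons] at ih ⊢
      exact ih

lemma partitionB (its : List (String × List String)) (a b : List (List String)) :
    its.foldl (fun (acc : List (List String) × List (List String)) kv =>
      let flat := kv.2.foldl (fun f s => f ++ [kv.1, s]) []
      if kv.2.length == 1 then (acc.1, acc.2 ++ [flat]) else (acc.1 ++ [flat], acc.2)) (a, b)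
    = (a ++ (its.filter (fun kv => !(kv.2.length == 1))).map (fun kv => kv.2.flatMap (fun s => [kv.1, s])),
       b ++ (its.filter (fun kv => kv.2.length == 1)).map (fun kv => kv.2.flatMap (fun s => [kv.1, s]))) := by
  induction its generalizing a b with
  | nil => simp
  | cons kv t ih =>
    have hstep : (let flat := List.foldl (fun f s => f ++ [kv.1, s]) [] kv.2;
        if (kv.2.length == 1) = true then ((a, b).1, (a, b).2 ++ [flat])
        else ((a, b).1 ++ [flat], (a, b).2))
      = if (kv.2.length == 1) = true then (a, b ++ [kv.2.flatMap (fun s => [kv.1, s])])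
        else (a ++ [kv.2.flatMap (fun s => [kv.1, s])], b) := by
      split <;> simp [PySem.List.foldl_append_eq_flatMap, List.flatMap_def]
    rw [List.foldl_cons, hstep]
    by_cases h : (kv.2.length == 1) = true
    · rw [if_pos h, ih]
      simp [List.filter_cons, h]
    · rw [if_neg h, ih]
      simp [List.filter_cons, h]

lemma B_eval (d : List (List String)) :
    Concat_ary_create_alt d = (pvC d d, pvN d d) := by
  unfold Concat_ary_create_alt
  set F := fun (g : PySem.Dict String (List String)) row =>
    g.modify (pvFst row) [] (fun v => v ++ [pvSnd row]) with hF
  have hkeys : (d.foldl F PySem.Dict.empty).keys = PySem.Set.ofList (pvHeads d) := by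
    rw [hF, PySem.Dict.keys_foldl_modify_key d pvFst [] (fun _ row v => v ++ [pvSnd row])
      PySem.Dict.empty, PySem.Dict.keys_empty, PySem.Set.update_nil_left]
    rfl
  have hnodup : (d.foldl F PySem.Dict.empty).keys.Nodup := by
    rw [hkeys]; exact PySem.Set.nodup_ofList _
  have hgetD : ∀ n, (d.foldl F PySem.Dict.empty).getD n [] = pvShts d n := by
    intro n
    have : d.foldl F PySem.Dict.empty
        = (d.map (fun r => (pvFst r, pvSnd r))).foldl
            (fun g p => g.modify p.1 [] (fun v => v ++ [p.2])) PySem.Dict.empty := by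
      rw [List.foldl_map]
    rw [this, PySem.Dict.getD_foldl_modify_append, PySem.Dict.getD_empty]
    rfl
  have hitems : (d.foldl F PySem.Dict.empty).items
      = (PySem.Set.ofList (pvHeads d)).map (fun n => (n, pvShts d n)) := by
    rw [PySem.Dict.items_eq_map_keys _ hnodup [], hkeys]
    exact List.map_congr_left (fun n _ => by rw [hgetD n])
  show (d.foldl F PySem.Dict.empty).items.foldl
      (fun (acc : List (List String) × List (List String)) kv =>
        let flat := kv.2.foldl (fun f s => f ++ [kv.1, s]) []
        if kv.2.length == 1 then (acc.1, acc.2 ++ [flat]) else (acc.1 ++ [flat], acc.2)) ([], [])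
    = (pvC d d, pvN d d)
  rw [hitems, partitionB, List.filter_map, List.filter_map, List.map_map, List.map_map]
  have hgrp : ((fun kv : String × List String => kv.2.flatMap (fun s => [kv.1, s])) ∘
      (fun n => (n, pvShts d n))) = pvGrp d := by
    funext n; simp [pvGrp, Function.comp_def]
  have hpred1 : ((fun kv : String × List String => kv.2.length == 1) ∘ (fun n => (n, pvShts d n)))
      = fun n => (pvHeads d).count n == 1 := by
    funext n; simp [Function.comp_def, shts_length]
  have hpred2 : ((fun kv : String × List String => !(kv.2.length == 1)) ∘ (fun n => (n, pvShts d n)))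
      = fun n => !((pvHeads d).count n == 1) := by
    funext n; simp [Function.comp_def, shts_length]
  rw [hgrp, hpred1, hpred2]
  unfold pvC pvN
  congr 1
  -- not-cover side: names occurring once, in row order = in first-seen order
  have hP : ∀ n, ((pvHeads d).count n == 1) = true → (pvHeads d).count n ≤ 1 := by
    intro n hn; simp at hn; omega
  rw [← L_filter_once (pvHeads d) _ hP, List.nil_append]
  conv_lhs => rw [show pvHeads d = d.map pvFst from rfl, List.filter_map, List.map_map]
  simp [Function.comp_def, pvHeads]

-- ===== VERDICT (by name: the statement is the Claim_ definition above) =====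
theorem Concat_ary_create_spec : Claim_equal_Concat_ary_create := by
  intro data _ _
  unfold Spec_Concat_ary_create
  rw [B_eval]
  unfold Concat_ary_create
  exact A_prefix data data (fun r hr => by simp [pvHeads]; exact ⟨r, hr, rfl⟩)
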